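-- pv_equiv track=rewrite | github.com/jamespark3922/adv-inf | compute_vocab_pos.py | parsePos
-- ===== SOURCE A (Python) =====
-- nltk_tags = ["$", "--", ",", ".", "''", "(", ")", "``", "CC", "CD", "DT", "EX", "FW", "IN", "JJ",
--                  "JJR", "JJS", "LS", "MD", "NN", "NNP", "NNPS", "NNS", "PDT", "POS", "PRP", "PRP$",
--                  "RB", "RBR", "RBS", "RP", "SYM", "TO", "UH", "VB", "VBD", "VBG", "VBN", "VBP", "VBZ",
--                  "WDT", "WP", "WP$", "WRB", ":"]
--
-- def parsePos(pos, tagsDict):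
--     phraseDict = {}
--     for t in nltk_tags:
--         phraseDict[t] = []
--
--     for word, tag in pos:
--         word = word.lower()
--         if word not in tagsDict[tag]:
--             tagsDict[tag][word] = 0
--         tagsDict[tag][word] += 1
--         phraseDict[tag].append(word)
--
--     return tagsDict, phraseDict
-- ===== SOURCE B (Python) =====
-- # B: two-pass decomposition — first group lowercased words per tag into phraseDict,
-- # then fold each tag's word list into the caller's tagsDict (which, like A, B mutates in place).
-- nltk_tags = ["$", "--", ",", ".", "''", "(", ")", "``", "CC", "CD", "DT", "EX", "FW", "IN", "JJ",
--                  "JJR", "JJS", "LS", "MD", "NN", "NNP", "NNPS", "NNS", "PDT", "POS", "PRP", "PRP$",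
--                  "RB", "RBR", "RBS", "RP", "SYM", "TO", "UH", "VB", "VBD", "VBG", "VBN", "VBP", "VBZ",
--                  "WDT", "WP", "WP$", "WRB", ":"]
--
-- def parsePos(pos, tagsDict):
--     phraseDict = {t: [] for t in nltk_tags}
--     for word, tag in pos:
--         phraseDict[tag].append(word.lower())
--     for tag, words in phraseDict.items():
--         if words:
--             d = tagsDict[tag]
--             for w in words:
--                 d[w] = d.get(w, 0) + 1
--     return tagsDict, phraseDict
-- ===== Notes on version B (the rewrite author's own statement) =====
-- stated objective: alternative
-- what changed: A updates tagsDict and phraseDict together in one interleaved loop with an explicit membership test per word; B first groups the lowercased words per tag into phraseDict in one pass, then in a second, differently-shaped pass folds each tag's accumulated word list into the caller's tagsDict.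
import Mathlib
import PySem

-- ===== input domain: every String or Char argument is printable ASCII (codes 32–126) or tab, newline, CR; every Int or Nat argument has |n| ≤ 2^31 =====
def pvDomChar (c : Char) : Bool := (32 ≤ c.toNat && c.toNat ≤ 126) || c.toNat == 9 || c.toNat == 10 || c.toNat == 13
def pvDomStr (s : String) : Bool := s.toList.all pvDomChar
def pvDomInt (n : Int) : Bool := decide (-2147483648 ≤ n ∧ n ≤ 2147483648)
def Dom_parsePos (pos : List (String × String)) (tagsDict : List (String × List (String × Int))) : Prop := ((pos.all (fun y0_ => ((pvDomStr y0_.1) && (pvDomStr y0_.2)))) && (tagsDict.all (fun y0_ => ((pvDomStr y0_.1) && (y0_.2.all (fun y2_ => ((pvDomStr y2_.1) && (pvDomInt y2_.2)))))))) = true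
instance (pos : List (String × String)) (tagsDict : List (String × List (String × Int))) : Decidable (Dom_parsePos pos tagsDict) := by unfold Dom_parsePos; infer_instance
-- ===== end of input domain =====

-- B replaces A's single interleaved loop by two passes (first group the lowercased words per tag
-- into phraseDict, then fold each tag's word list into tagsDict); objective: alternative
-- decomposition, same cost. Like A, the Python B mutates the argument tagsDict in place; the
-- theorems below are about the return value.

def pvNltkTags : List String := ["$", "--", ",", ".", "''", "(", ")", "``", "CC", "CD", "DT", "EX", "FW", "IN", "JJ",
  "JJR", "JJS", "LS", "MD", "NN", "NNP", "NNPS", "NNS", "PDT", "POS", "PRP", "PRP$",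
  "RB", "RBR", "RBS", "RP", "SYM", "TO", "UH", "VB", "VBD", "VBG", "VBN", "VBP", "VBZ",
  "WDT", "WP", "WP$", "WRB", ":"]

-- ===== PORT A =====
-- the body of A's single loop: word = word.lower(); membership test; count bump; phrase append
def parsePosStep (st : PySem.Dict String (List (String × Int)) × PySem.Dict String (List String))
    (wt : String × String) : PySem.Dict String (List (String × Int)) × PySem.Dict String (List String) :=
  let word := PySem.Str.lower wt.1
  let inner := PySem.Dict.mk (st.1.getD wt.2 [])
  let inner := if (inner.get? word).isNone then inner.insert word 0 else inner
  let inner := inner.insert word (inner.getD word 0 + 1)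
  (st.1.insert wt.2 inner.items, st.2.insert wt.2 (st.2.getD wt.2 [] ++ [word]))

def parsePos (pos : List (String × String)) (tagsDict : List (String × List (String × Int))) : (List (String × List (String × Int))) × (List (String × List String)) :=
  let phraseDict : PySem.Dict String (List String) :=
    pvNltkTags.foldl (fun pd t => pd.insert t []) PySem.Dict.empty
  let st := pos.foldl parsePosStep (PySem.Dict.mk tagsDict, phraseDict)
  (st.1.items, st.2.items)

-- ===== PORT B =====
-- pass 1 body: phraseDict[tag].append(word.lower())
def parsePosAltPhraseStep (pd : PySem.Dict String (List String)) (wt : String × String) :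
    PySem.Dict String (List String) :=
  pd.insert wt.2 (pd.getD wt.2 [] ++ [PySem.Str.lower wt.1])

-- pass 2 body: if words: d = tagsDict[tag]; for w in words: d[w] = d.get(w, 0) + 1
def parsePosAltTagStep (td : PySem.Dict String (List (String × Int))) (tw : String × List String) :
    PySem.Dict String (List (String × Int)) :=
  if tw.2.isEmpty then td
  else
    let d := PySem.Dict.mk (td.getD tw.1 [])
    let d := tw.2.foldl (fun d w => d.insert w (d.getD w 0 + 1)) d
    td.insert tw.1 d.items

def parsePos_alt (pos : List (String × String)) (tagsDict : List (String × List (String × Int))) : (List (String × List (String × Int))) × (List (String × List String)) :=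
  let phraseDict : PySem.Dict String (List String) :=
    pvNltkTags.foldl (fun pd t => pd.insert t []) PySem.Dict.empty
  let phraseDict := pos.foldl parsePosAltPhraseStep phraseDict
  let td := phraseDict.items.foldl parsePosAltTagStep (PySem.Dict.mk tagsDict)
  (td.items, phraseDict.items)

-- ===== PRECONDITION & SPEC =====
-- Pre_ excludes exactly (i) inputs where Python A raises KeyError (a tag of pos outside nltk_tags
-- or missing from tagsDict) and (ii) association lists with duplicate outer keys, which do not
-- represent any Python dict (tagsDict is a dict in Python, so its keys are necessarily distinct).
def Pre_parsePos (pos : List (String × String)) (tagsDict : List (String × List (String × Int))) : Prop :=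
  (∀ p ∈ pos, p.2 ∈ pvNltkTags ∧ p.2 ∈ tagsDict.map Prod.fst) ∧ (tagsDict.map Prod.fst).Nodup
instance (pos : List (String × String)) (tagsDict : List (String × List (String × Int))) : Decidable (Pre_parsePos pos tagsDict) := by unfold Pre_parsePos; infer_instance

def pvWitness_parsePos : (List (String × String)) × (List (String × List (String × Int))) :=
  ([("The", "DT"), ("dog", "NN"), ("the", "DT")], [("DT", [("a", 2)]), ("NN", [])])

def Spec_parsePos (pos : List (String × String)) (tagsDict : List (String × List (String × Int))) (out : (List (String × List (String × Int))) × (List (String × List String))) : Prop := out = parsePos_alt pos tagsDict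
instance (pos : List (String × String)) (tagsDict : List (String × List (String × Int))) (out : (List (String × List (String × Int))) × (List (String × List String))) : Decidable (Spec_parsePos pos tagsDict out) := by unfold Spec_parsePos; infer_instance

-- ===== CLAIM (what is proved, stated in full; the proofs are below) =====
def Claim_equal_parsePos : Prop := ∀ (pos : List (String × String)) (tagsDict : List (String × List (String × Int))), Dom_parsePos pos tagsDict → Pre_parsePos pos tagsDict → Spec_parsePos pos tagsDict (parsePos pos tagsDict)

-- ===== LEMMAS AND PROOFS =====

-- lowercased words of pos carrying tag t, in order
def pvTagWords (t : String) (pos : List (String × String)) : List String :=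
  (pos.filter (fun p => p.2 == t)).map (fun p => PySem.Str.lower p.1)

-- the counting fold both programs apply to one tag's inner dict
def pvApplyC (d : PySem.Dict String Int) (ws : List String) : PySem.Dict String Int :=
  ws.foldl (fun d w => d.insert w (d.getD w 0 + 1)) d

-- the words a grouped items-list assigns to key k
def pvWsOf (ts : List (String × List String)) (k : String) : List String :=
  ((ts.filter (fun e => e.1 == k)).map (·.2)).flatten

-- A's td-only loop body (parsePosStep's first component, with the membership test folded away)
def pvAStepTd (td : PySem.Dict String (List (String × Int))) (wt : String × String) :
    PySem.Dict String (List (String × Int)) :=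
  td.insert wt.2 ((pvApplyC (PySem.Dict.mk (td.getD wt.2 [])) [PySem.Str.lower wt.1]).items)

theorem pvNltkTags_nodup : pvNltkTags.Nodup := by decide

theorem pvTagWords_cons (t : String) (p : String × String) (pos : List (String × String)) :
    pvTagWords t (p :: pos) =
      if p.2 = t then PySem.Str.lower p.1 :: pvTagWords t pos else pvTagWords t pos := by
  simp only [pvTagWords, List.filter_cons]
  by_cases h : p.2 = t <;> simp [h]

-- A's membership-test-then-bump equals the unconditional get-default bump
theorem pvInnerStep (d : PySem.Dict String Int) (w : String) :
    (if (d.get? w).isNone then d.insert w 0 else d).insert w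
      ((if (d.get? w).isNone then d.insert w 0 else d).getD w 0 + 1) = d.insert w (d.getD w 0 + 1) := by
  cases hg : d.get? w with
  | some v => simp
  | none =>
      simp only [Option.isNone_none, if_pos]
      rw [PySem.Dict.getD_insert_self, PySem.Dict.insert_insert_self,
        PySem.Dict.getD_of_get?_eq_none d 0 hg]

theorem pvWsOf_cons (e : String × List String) (ts : List (String × List String)) (k : String) :
    pvWsOf (e :: ts) k = if e.1 == k then e.2 ++ pvWsOf ts k else pvWsOf ts k := by
  by_cases h : e.1 = k <;> simp [pvWsOf, List.filter_cons, h]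

theorem pvWsOf_nil_of_not_mem (ts : List (String × List String)) (k : String)
    (h : k ∉ ts.map Prod.fst) : pvWsOf ts k = [] := by
  induction ts with
  | nil => rfl
  | cons e rest ih =>
      simp only [List.map_cons, List.mem_cons, not_or] at h
      have hb : (e.1 == k) = false := by simpa using Ne.symm h.1
      rw [pvWsOf_cons, hb]
      simp only [Bool.false_eq_true, if_false]
      exact ih h.2

theorem pvWsOf_map (ts : List String) (f : String → List String) (k : String) (hnd : ts.Nodup) :
    pvWsOf (ts.map (fun t => (t, f t))) k = if k ∈ ts then f k else [] := by
  induction ts with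
  | nil => simp [pvWsOf]
  | cons t rest ih =>
      simp only [List.nodup_cons] at hnd
      by_cases h : t = k
      · subst h
        have hc : pvWsOf ((t, f t) :: rest.map (fun t => (t, f t))) t = f t ++ pvWsOf (rest.map (fun t => (t, f t))) t := by
          simp [pvWsOf, List.filter_cons]
        have hnm : t ∉ (rest.map (fun t => (t, f t))).map Prod.fst := by simp [hnd.1]
        simp only [List.map_cons, hc, pvWsOf_nil_of_not_mem _ _ hnm]
        simp
      · have hc : pvWsOf ((t, f t) :: rest.map (fun t => (t, f t))) k = pvWsOf (rest.map (fun t => (t, f t))) k := by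
          simp [pvWsOf, h]
        simp only [List.map_cons, hc, ih hnd.2]
        simp [List.mem_cons, Ne.symm h]

-- pass-1 characterisation (shared shape of A's phrase updates and B's first loop)
theorem pvPdFold (pos : List (String × String)) (pd : PySem.Dict String (List String))
    (hnd : pd.keys.Nodup) (hc : ∀ p ∈ pos, pd.contains p.2 = true) :
    (pos.foldl parsePosAltPhraseStep pd).items =
      pd.items.map (fun e => (e.1, e.2 ++ pvTagWords e.1 pos)) := by
  induction pos generalizing pd with
  | nil => simp [pvTagWords]
  | cons p pos ih =>
      have hcp : pd.contains p.2 = true := hc p (List.mem_cons_self ..)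
      rw [List.foldl_cons]
      rw [ih (parsePosAltPhraseStep pd p)
        (PySem.Dict.nodup_keys_insert _ _ _ hnd)
        (fun q hq => by
          simp only [parsePosAltPhraseStep, PySem.Dict.contains_insert]
          rw [hc q (List.mem_cons_of_mem _ hq)]; simp)]
      show (PySem.Dict.insert pd p.2 _).items.map _ = _
      rw [PySem.Dict.items_insert_of_contains pd _ hcp, List.map_map]
      apply List.map_congr_left
      intro e he
      by_cases h : e.1 = p.2
      · have hgd : pd.getD e.1 [] = e.2 :=
          PySem.Dict.getD_of_mem_items pd (by simpa using he) hnd []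
        simp only [Function.comp, h, beq_self_eq_true, if_pos, pvTagWords_cons]
        rw [← h, hgd]
        simp [h]
      · have hb : (e.1 == p.2) = false := by simpa using h
        simp only [Function.comp, hb, Bool.false_eq_true, if_false, pvTagWords_cons]
        have : ¬ p.2 = e.1 := fun hh => h hh.symm
        simp [this]

-- A's pair fold splits into two independent folds
theorem pvAFold_proj (pos : List (String × String)) (td : PySem.Dict String (List (String × Int)))
    (pd : PySem.Dict String (List String)) :
    pos.foldl parsePosStep (td, pd) = (pos.foldl pvAStepTd td, pos.foldl parsePosAltPhraseStep pd) := by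
  induction pos generalizing td pd with
  | nil => rfl
  | cons p pos ih =>
      rw [List.foldl_cons, List.foldl_cons, List.foldl_cons]
      have hstep : parsePosStep (td, pd) p = (pvAStepTd td p, parsePosAltPhraseStep pd p) := by
        simp only [parsePosStep, pvAStepTd, parsePosAltPhraseStep, pvApplyC, List.foldl_cons, List.foldl_nil]
        rw [pvInnerStep]
      rw [hstep, ih]

-- A's tagsDict loop, characterised
theorem pvAFoldTd (pos : List (String × String)) (td : PySem.Dict String (List (String × Int)))
    (hnd : td.keys.Nodup) (hc : ∀ p ∈ pos, td.contains p.2 = true) :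
    (pos.foldl pvAStepTd td).items =
      td.items.map (fun e => (e.1, (pvApplyC (PySem.Dict.mk e.2) (pvTagWords e.1 pos)).items)) := by
  induction pos generalizing td with
  | nil => simp [pvTagWords, pvApplyC]
  | cons p pos ih =>
      have hcp : td.contains p.2 = true := hc p (List.mem_cons_self ..)
      rw [List.foldl_cons]
      rw [ih (pvAStepTd td p)
        (PySem.Dict.nodup_keys_insert _ _ _ hnd)
        (fun q hq => by
          simp only [pvAStepTd, PySem.Dict.contains_insert]
          rw [hc q (List.mem_cons_of_mem _ hq)]; simp)]
      show (PySem.Dict.insert td p.2 _).items.map _ = _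
      rw [PySem.Dict.items_insert_of_contains td _ hcp, List.map_map]
      apply List.map_congr_left
      intro e he
      by_cases h : e.1 = p.2
      · have hgd : td.getD e.1 [] = e.2 :=
          PySem.Dict.getD_of_mem_items td (by simpa using he) hnd []
        simp only [Function.comp, h, beq_self_eq_true, if_pos, pvTagWords_cons]
        rw [← h, hgd]
        have hmk : PySem.Dict.mk ((pvApplyC (PySem.Dict.mk e.2) [PySem.Str.lower p.1]).items)
            = pvApplyC (PySem.Dict.mk e.2) [PySem.Str.lower p.1] := rfl
        rw [hmk]
        have hcomp : pvApplyC (pvApplyC (PySem.Dict.mk e.2) [PySem.Str.lower p.1]) (pvTagWords e.1 pos)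
            = pvApplyC (PySem.Dict.mk e.2) (PySem.Str.lower p.1 :: pvTagWords e.1 pos) := rfl
        rw [hcomp]
      · have hb : (e.1 == p.2) = false := by simpa using h
        simp only [Function.comp, hb, Bool.false_eq_true, if_false, pvTagWords_cons]
        have : ¬ p.2 = e.1 := fun hh => h hh.symm
        simp [this]

-- B's second pass, characterised
theorem pvBFold (ts : List (String × List String)) (td : PySem.Dict String (List (String × Int)))
    (hndt : td.keys.Nodup) (hndts : (ts.map Prod.fst).Nodup)
    (hc : ∀ e ∈ ts, e.2.isEmpty = false → td.contains e.1 = true) :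
    (ts.foldl parsePosAltTagStep td).items =
      td.items.map (fun e => (e.1, (pvApplyC (PySem.Dict.mk e.2) (pvWsOf ts e.1)).items)) := by
  induction ts generalizing td with
  | nil => simp [pvWsOf, pvApplyC]
  | cons e ts ih =>
      simp only [List.map_cons, List.nodup_cons] at hndts
      rw [List.foldl_cons]
      by_cases hws : e.2.isEmpty
      · have hstep : parsePosAltTagStep td e = td := by simp [parsePosAltTagStep, hws]
        rw [hstep, ih td hndt hndts.2 (fun q hq => hc q (List.mem_cons_of_mem _ hq))]
        apply List.map_congr_left
        intro e' _
        rw [pvWsOf_cons]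
        have : e.2 = [] := by simpa [List.isEmpty_iff] using hws
        by_cases h : e.1 = e'.1 <;> simp [h, this]
      · have hct : td.contains e.1 = true := hc e (List.mem_cons_self ..) (by simpa using hws)
        have hstep : parsePosAltTagStep td e =
            td.insert e.1 ((pvApplyC (PySem.Dict.mk (td.getD e.1 [])) e.2).items) := by
          simp only [parsePosAltTagStep, pvApplyC]
          rw [if_neg (by simpa using hws)]
        rw [hstep]
        rw [ih _ (PySem.Dict.nodup_keys_insert _ _ _ hndt) hndts.2
          (fun q hq hqe => by
            rw [PySem.Dict.contains_insert]
            rw [hc q (List.mem_cons_of_mem _ hq) hqe]; simp)]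
        rw [PySem.Dict.items_insert_of_contains td _ hct, List.map_map]
        apply List.map_congr_left
        intro e' he'
        by_cases h : e'.1 = e.1
        · have hgd : td.getD e'.1 [] = e'.2 :=
            PySem.Dict.getD_of_mem_items td (by simpa using he') hndt []
          have hnm : e.1 ∉ ts.map Prod.fst := hndts.1
          simp only [Function.comp, h, beq_self_eq_true, if_pos, pvWsOf_cons]
          rw [← h, hgd]
          have hmk : PySem.Dict.mk ((pvApplyC (PySem.Dict.mk e'.2) e.2).items)
              = pvApplyC (PySem.Dict.mk e'.2) e.2 := rfl
          rw [hmk]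
          rw [h, pvWsOf_nil_of_not_mem ts e.1 hnm]
          have hcomp : pvApplyC (pvApplyC (PySem.Dict.mk e'.2) e.2) [] = pvApplyC (PySem.Dict.mk e'.2) e.2 := rfl
          rw [hcomp]
          simp
        · have hb : (e'.1 == e.1) = false := by simpa using h
          have hb' : (e.1 == e'.1) = false := by simpa using fun hh => h hh.symm
          simp only [Function.comp, hb, hb', Bool.false_eq_true, if_false, pvWsOf_cons]

theorem pvPd0_items :
    (pvNltkTags.foldl (fun pd t => pd.insert t []) (PySem.Dict.empty : PySem.Dict String (List String))).items
      = pvNltkTags.map (fun t => (t, ([] : List String))) := by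
  have := PySem.Dict.items_foldl_insert_fresh pvNltkTags (fun t => t) (fun _ => ([] : List String))
    (PySem.Dict.empty : PySem.Dict String (List String))
    (fun a _ => by simp) (by simpa using pvNltkTags_nodup)
  simpa using this

-- ===== VERDICT (by name: the statement is the Claim_ definition above) =====
theorem parsePos_spec : Claim_equal_parsePos := by
  intro pos tagsDict _ hpre
  obtain ⟨h1, h2⟩ := hpre
  unfold Spec_parsePos parsePos parsePos_alt
  -- shared initial phraseDict
  set pd0 : PySem.Dict String (List String) :=
    pvNltkTags.foldl (fun pd t => pd.insert t []) PySem.Dict.empty with hpd0def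
  have hpd0 : pd0.items = pvNltkTags.map (fun t => (t, ([] : List String))) := pvPd0_items
  have hk0 : pd0.keys = pvNltkTags := by
    simp [PySem.Dict.keys, hpd0, List.map_map, Function.comp_def]
  have hnd0 : pd0.keys.Nodup := by rw [hk0]; exact pvNltkTags_nodup
  have hkT : (PySem.Dict.mk tagsDict).keys = tagsDict.map Prod.fst := rfl
  have hndT : (PySem.Dict.mk tagsDict).keys.Nodup := by rw [hkT]; exact h2
  have hcT : ∀ p ∈ pos, (PySem.Dict.mk tagsDict).contains p.2 = true := by
    intro p hp
    rw [PySem.Dict.contains_eq_decide_mem_keys, hkT]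
    exact decide_eq_true (h1 p hp).2
  have hc0 : ∀ p ∈ pos, pd0.contains p.2 = true := by
    intro p hp
    rw [PySem.Dict.contains_eq_decide_mem_keys, hk0]
    exact decide_eq_true (h1 p hp).1
  -- both phrase dictionaries are the same fold; characterise it once
  have hpd : (pos.foldl parsePosAltPhraseStep pd0).items =
      pvNltkTags.map (fun t => (t, pvTagWords t pos)) := by
    rw [pvPdFold pos pd0 hnd0 hc0, hpd0, List.map_map]
    simp [Function.comp]
  -- A's components
  have hA : (pos.foldl pvAStepTd (PySem.Dict.mk tagsDict)).items =
      tagsDict.map (fun e => (e.1, (pvApplyC (PySem.Dict.mk e.2) (pvTagWords e.1 pos)).items)) :=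
    pvAFoldTd pos _ hndT hcT
  -- B's second pass over the characterised phrase items
  have hB : ((pos.foldl parsePosAltPhraseStep pd0).items.foldl parsePosAltTagStep (PySem.Dict.mk tagsDict)).items =
      tagsDict.map (fun e => (e.1, (pvApplyC (PySem.Dict.mk e.2)
        (pvWsOf (pvNltkTags.map (fun t => (t, pvTagWords t pos))) e.1)).items)) := by
    rw [hpd]
    apply pvBFold
    · exact hndT
    · simpa [List.map_map, Function.comp] using pvNltkTags_nodup
    · intro e he hne
      simp only [List.mem_map] at he
      obtain ⟨t, ht, rfl⟩ := he
      simp only [List.isEmpty_eq_false_iff] at hne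
      have : ∃ p ∈ pos, p.2 = t := by
        by_contra hcon
        push_neg at hcon
        apply hne
        simp only [pvTagWords, List.map_eq_nil_iff, List.filter_eq_nil_iff]
        intro p hp
        simpa using hcon p hp
      obtain ⟨p, hp, hpt⟩ := this
      rw [PySem.Dict.contains_eq_decide_mem_keys, hkT]
      exact decide_eq_true (hpt ▸ (h1 p hp).2)
  refine Prod.ext ?_ ?_
  · show ((pos.foldl parsePosStep (PySem.Dict.mk tagsDict, pd0)).1).items =
      ((pos.foldl parsePosAltPhraseStep pd0).items.foldl parsePosAltTagStep (PySem.Dict.mk tagsDict)).items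
    rw [pvAFold_proj]
    show (pos.foldl pvAStepTd (PySem.Dict.mk tagsDict)).items = _
    rw [hA, hB]
    apply List.map_congr_left
    intro e he
    by_cases hmem : e.1 ∈ pvNltkTags
    · rw [pvWsOf_map pvNltkTags (fun t => pvTagWords t pos) e.1 pvNltkTags_nodup, if_pos hmem]
    · rw [pvWsOf_map pvNltkTags (fun t => pvTagWords t pos) e.1 pvNltkTags_nodup, if_neg hmem]
      have htw : pvTagWords e.1 pos = [] := by
        simp only [pvTagWords, List.map_eq_nil_iff, List.filter_eq_nil_iff]
        intro p hp
        simp only [beq_iff_eq]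
        intro hpe
        exact hmem (hpe ▸ (h1 p hp).1)
      rw [htw]
  · show ((pos.foldl parsePosStep (PySem.Dict.mk tagsDict, pd0)).2).items =
      (pos.foldl parsePosAltPhraseStep pd0).items
    rw [pvAFold_proj]
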